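-- pv_equiv track=rewrite | github.com/aphoticshaman/HungryOrca | gatorca_phase5_dna_library.py | scale_up_3x
-- ===== SOURCE A (Python) =====
-- from typing import List, Dict, Any, Tuple, Set
--
-- Grid = List[List[int]]
--
-- def scale_up_3x(g: Grid) -> Grid:
--     """Scale up by 3x"""
--     if not g or not g[0]:
--         return g
--     h, w = len(g), len(g[0])
--     result = [[0]*(w*3) for _ in range(h*3)]
--     for y in range(h):
--         for x in range(w):
--             for dy in range(3):
--                 for dx in range(3):
--                     result[y*3+dy][x*3+dx] = g[y][x]
--     return result
-- ===== SOURCE B (Python) =====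
-- from typing import List
--
-- Grid = List[List[int]]
--
-- def scale_up_3x(g: Grid) -> Grid:
--     """Scale up by 3x: build each expanded row once, then replicate it three times."""
--     if not g or not g[0]:
--         return g
--     w = len(g[0])
--     result = []
--     for row in g:
--         scaled = [row[x] for x in range(w) for _ in range(3)]
--         result.extend([list(scaled), list(scaled), list(scaled)])
--     return result
-- ===== Notes on version B (the rewrite author's own statement) =====
-- stated objective: simpler
-- what changed: Replaces the preallocated h*3 x w*3 zero matrix filled by quadruply nested index writes with a single pass over the rows that builds each expanded row once as a comprehension and appends three copies of it.
import Mathlib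
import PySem

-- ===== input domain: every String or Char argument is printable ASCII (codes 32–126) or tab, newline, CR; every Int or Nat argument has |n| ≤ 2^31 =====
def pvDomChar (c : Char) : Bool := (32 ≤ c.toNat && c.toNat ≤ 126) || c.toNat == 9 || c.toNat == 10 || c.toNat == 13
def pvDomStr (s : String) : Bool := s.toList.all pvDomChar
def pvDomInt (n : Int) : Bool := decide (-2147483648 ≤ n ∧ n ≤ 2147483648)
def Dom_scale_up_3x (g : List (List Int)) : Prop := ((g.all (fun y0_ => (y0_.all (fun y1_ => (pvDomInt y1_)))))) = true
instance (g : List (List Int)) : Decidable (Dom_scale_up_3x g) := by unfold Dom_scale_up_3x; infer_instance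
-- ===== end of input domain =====

-- B builds each expanded row once and appends three copies of it (one pass over the rows),
-- instead of A's preallocated (h*3)×(w*3) zero matrix filled by quadruply nested index writes;
-- objective: simpler. Return-value equivalence only; neither version mutates its argument.

-- ===== PORT A =====
def scale_up_3x (g : List (List Int)) : List (List Int) :=
  if g = [] ∨ g.headD [] = [] then g
  else
    let h := g.length
    let w := (g.headD []).length
    let init := List.replicate (h*3) (List.replicate (w*3) (0:Int))
    (List.range h).foldl (fun res y =>
      (List.range w).foldl (fun res x =>
        (List.range 3).foldl (fun res dy =>
          (List.range 3).foldl (fun res dx =>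
            res.set (y*3+dy) ((res.getD (y*3+dy) []).set (x*3+dx) ((g.getD y []).getD x 0))) res) res) res) init

-- ===== PORT B =====
def scale_up_3x_alt (g : List (List Int)) : List (List Int) :=
  if g = [] ∨ g.headD [] = [] then g
  else
    let w := (g.headD []).length
    g.foldl (fun result row =>
      let scaled := (List.range w).flatMap (fun x => List.replicate 3 (row.getD x 0))
      result ++ [scaled, scaled, scaled]) []

-- ===== PRECONDITION & SPEC =====
-- Pre_ excludes exactly the inputs on which the Python A raises IndexError: grids whose first
-- row is longer than some later row (g[y][x] with x < len(g[0]) is then out of range); the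
-- Python B raises on exactly the same inputs.
def Pre_scale_up_3x (g : List (List Int)) : Prop :=
  ∀ row ∈ g, (g.headD []).length ≤ row.length
instance (g : List (List Int)) : Decidable (Pre_scale_up_3x g) := by unfold Pre_scale_up_3x; infer_instance

def pvWitness_scale_up_3x : List (List Int) := [[1, 2], [3, 4]]

def Spec_scale_up_3x (g : List (List Int)) (out : List (List Int)) : Prop := out = scale_up_3x_alt g
instance (g : List (List Int)) (out : List (List Int)) : Decidable (Spec_scale_up_3x g out) := by unfold Spec_scale_up_3x; infer_instance

-- ===== CLAIM (what is proved, stated in full; the proofs are below) =====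
def Claim_equal_scale_up_3x : Prop := ∀ (g : List (List Int)), Dom_scale_up_3x g → Pre_scale_up_3x g → Spec_scale_up_3x g (scale_up_3x g)

-- ===== LEMMAS AND PROOFS =====

-- One write of A's inner loop body: set column t.2.1 of row t.1 to value t.2.2.
def pvStep (res : List (List Int)) (t : Nat × Nat × Int) : List (List Int) :=
  res.set t.1 ((res.getD t.1 []).set t.2.1 t.2.2)

-- The flattened sequence of writes A performs.
def pvWrites (g : List (List Int)) (h w : Nat) : List (Nat × Nat × Int) :=
  (List.range h).flatMap fun y =>
    (List.range w).flatMap fun x =>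
      (List.range 3).flatMap fun dy =>
        (List.range 3).map fun dx =>
          (y*3+dy, x*3+dx, (g.getD y []).getD x 0)

lemma pvA_eq_fold (g : List (List Int)) (hg : ¬ (g = [] ∨ g.headD [] = [])) :
    scale_up_3x g =
      (pvWrites g g.length (g.headD []).length).foldl pvStep
        (List.replicate (g.length*3) (List.replicate ((g.headD []).length*3) (0:Int))) := by
  simp only [scale_up_3x, hg, if_false, pvWrites, pvStep, List.foldl_flatMap, List.foldl_map]

lemma pvGetD_set (l : List Int) (i j : Nat) (v d : Int) :
    (l.set i v).getD j d = if i = j ∧ i < l.length then v else l.getD j d := by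
  by_cases h1 : i = j
  · subst h1
    by_cases h2 : i < l.length
    · simp [List.getD_eq_getElem?_getD, h2]
    · simp [List.set_eq_of_length_le (Nat.le_of_not_lt h2), h2]
  · simp [List.getD_eq_getElem?_getD, List.getElem?_set_ne h1, h1]

lemma pvGetD_set_rows (l : List (List Int)) (i j : Nat) (v d : List Int) :
    (l.set i v).getD j d = if i = j ∧ i < l.length then v else l.getD j d := by
  by_cases h1 : i = j
  · subst h1
    by_cases h2 : i < l.length
    · simp [List.getD_eq_getElem?_getD, h2]
    · simp [List.set_eq_of_length_le (Nat.le_of_not_lt h2), h2]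
  · simp [List.getD_eq_getElem?_getD, List.getElem?_set_ne h1, h1]

lemma pvFold_length (ws : List (Nat × Nat × Int)) (res : List (List Int)) :
    (ws.foldl pvStep res).length = res.length := by
  induction ws generalizing res with
  | nil => rfl
  | cons t ws ih => simp [List.foldl_cons, ih, pvStep]

lemma pvFold_rowlen (ws : List (Nat × Nat × Int)) (res : List (List Int)) (i : Nat) :
    ((ws.foldl pvStep res).getD i []).length = (res.getD i []).length := by
  induction ws generalizing res with
  | nil => rfl
  | cons t ws ih =>
      rw [List.foldl_cons, ih]
      rw [pvStep, pvGetD_set_rows]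
      split_ifs with h
      · rw [h.1, List.length_set]
      · rfl

lemma pvFold_preserve (ws : List (Nat × Nat × Int)) (res : List (List Int)) (R C : Nat) (V : Int)
    (hv : ∀ p ∈ ws, p.1 = R → p.2.1 = C → p.2.2 = V)
    (h0 : ((res.getD R []).getD C 0) = V) :
    (((ws.foldl pvStep res).getD R []).getD C 0) = V := by
  induction ws generalizing res with
  | nil => exact h0
  | cons t ws ih =>
      rw [List.foldl_cons]
      refine ih _ (fun p hp => hv p (List.mem_cons_of_mem _ hp)) ?_
      rw [pvStep, pvGetD_set_rows]
      split_ifs with h1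
      · rw [h1.1, pvGetD_set]
        split_ifs with h2
        · exact hv t (List.mem_cons_self) h1.1 h2.1
        · exact h0
      · exact h0

lemma pvFold_write (ws : List (Nat × Nat × Int)) (res : List (List Int)) (R C : Nat) (V : Int)
    (hmem : (R, C, V) ∈ ws)
    (hv : ∀ p ∈ ws, p.1 = R → p.2.1 = C → p.2.2 = V)
    (hR : R < res.length) (hC : C < (res.getD R []).length) :
    (((ws.foldl pvStep res).getD R []).getD C 0) = V := by
  induction ws generalizing res with
  | nil => cases hmem
  | cons t ws ih =>
      rw [List.foldl_cons]
      by_cases ht : t.1 = R ∧ t.2.1 = C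
      · refine pvFold_preserve ws _ R C V (fun p hp => hv p (List.mem_cons_of_mem _ hp)) ?_
        rw [pvStep, pvGetD_set_rows]
        rw [if_pos ⟨ht.1, by rw [ht.1]; exact hR⟩, ht.1, ht.2]
        rw [pvGetD_set, if_pos ⟨rfl, hC⟩]
        exact hv t (List.mem_cons_self) ht.1 ht.2
      · have hmem' : (R, C, V) ∈ ws := by
          rcases List.mem_cons.mp hmem with h | h
          · exact absurd (by rw [← h]; exact ⟨rfl, rfl⟩) ht
          · exact h
        refine ih _ hmem' (fun p hp => hv p (List.mem_cons_of_mem _ hp)) ?_ ?_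
        · rw [pvStep, List.length_set]; exact hR
        · calc C < (res.getD R []).length := hC
            _ = ((pvStep res t).getD R []).length := by
                rw [pvStep, pvGetD_set_rows]
                split_ifs with h
                · rw [h.1, List.length_set]
                · rfl

lemma pvWrites_mem (g : List (List Int)) (h w : Nat) (p : Nat × Nat × Int) :
    p ∈ pvWrites g h w ↔
      ∃ y < h, ∃ x < w, ∃ dy < 3, ∃ dx < 3,
        p = (y*3+dy, x*3+dx, (g.getD y []).getD x 0) := by
  simp only [pvWrites, List.mem_flatMap, List.mem_map, List.mem_range]
  constructor
  · rintro ⟨y, hy, x, hx, dy, hdy, dx, hdx, rfl⟩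
    exact ⟨y, hy, x, hx, dy, hdy, dx, hdx, rfl⟩
  · rintro ⟨y, hy, x, hx, dy, hdy, dx, hdx, rfl⟩
    exact ⟨y, hy, x, hx, dy, hdy, dx, hdx, rfl⟩

lemma pvA_getD (g : List (List Int)) (hg : ¬ (g = [] ∨ g.headD [] = []))
    (R C : Nat) (hR : R < g.length*3) (hC : C < (g.headD []).length*3) :
    (((scale_up_3x g).getD R []).getD C 0) = (g.getD (R/3) []).getD (C/3) 0 := by
  rw [pvA_eq_fold g hg]
  apply pvFold_write
  · rw [pvWrites_mem]
    refine ⟨R/3, by omega, C/3, by omega, R % 3, by omega, C % 3, by omega, ?_⟩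
    have e1 : R/3*3 + R % 3 = R := by omega
    have e2 : C/3*3 + C % 3 = C := by omega
    rw [e1, e2]
  · intro p hp h1 h2
    rw [pvWrites_mem] at hp
    obtain ⟨y, hy, x, hx, dy, hdy, dx, hdx, rfl⟩ := hp
    simp only at h1 h2 ⊢
    have hy3 : y = R/3 := by omega
    have hx3 : x = C/3 := by omega
    rw [← hy3, ← hx3]
  · simpa using hR
  · rw [List.getD_replicate _ (by simpa using hR)]
    simpa using hC

lemma pvA_length (g : List (List Int)) (hg : ¬ (g = [] ∨ g.headD [] = [])) :
    (scale_up_3x g).length = g.length*3 := by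
  rw [pvA_eq_fold g hg, pvFold_length]; simp

lemma pvA_rowlen (g : List (List Int)) (hg : ¬ (g = [] ∨ g.headD [] = []))
    (R : Nat) (hR : R < g.length*3) :
    ((scale_up_3x g).getD R []).length = (g.headD []).length*3 := by
  rw [pvA_eq_fold g hg, pvFold_rowlen, List.getD_replicate _ (by simpa using hR)]
  simp

-- B-side characterisation.
def pvSRow (w : Nat) (row : List Int) : List Int :=
  (List.range w).flatMap (fun x => List.replicate 3 (row.getD x 0))

lemma pvB_eq_flatMap_aux (w : Nat) (g : List (List Int)) (acc : List (List Int)) :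
    g.foldl (fun result row =>
        let scaled := (List.range w).flatMap (fun x => List.replicate 3 (row.getD x 0))
        result ++ [scaled, scaled, scaled]) acc
      = acc ++ g.flatMap (fun row => [pvSRow w row, pvSRow w row, pvSRow w row]) := by
  induction g generalizing acc with
  | nil => simp
  | cons row g ih =>
      rw [List.foldl_cons, ih, List.flatMap_cons]
      simp [pvSRow, List.append_assoc]

lemma pvB_eq_flatMap (g : List (List Int)) (hg : ¬ (g = [] ∨ g.headD [] = [])) :
    scale_up_3x_alt g =
      g.flatMap (fun row =>
        [pvSRow (g.headD []).length row, pvSRow (g.headD []).length row,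
         pvSRow (g.headD []).length row]) := by
  simp only [scale_up_3x_alt, hg, if_false]
  exact (pvB_eq_flatMap_aux _ g []).trans (by simp)

lemma pvLen_flatMap3 {α β : Type} (L : List α) (f : α → List β)
    (hf : ∀ a, (f a).length = 3) : (L.flatMap f).length = L.length*3 := by
  induction L with
  | nil => rfl
  | cons a L ih => simp [List.flatMap_cons, hf, ih]; omega

lemma pvGetD_flatMap3 {α β : Type} (L : List α) (dα : α) (f : α → List β)
    (hf : ∀ a, (f a).length = 3) (k : Nat) (hk : k < L.length*3) (d : β) :
    (L.flatMap f).getD k d = (f (L.getD (k/3) dα)).getD (k % 3) d := by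
  induction L generalizing k with
  | nil => simp at hk
  | cons a L ih =>
      rw [List.flatMap_cons]
      by_cases h3 : k < 3
      · rw [List.getD_append _ _ _ _ (by rw [hf]; exact h3)]
        rw [Nat.div_eq_of_lt h3, Nat.mod_eq_of_lt h3, List.getD_cons_zero]
      · rw [List.getD_append_right _ _ _ _ (by rw [hf]; omega)]
        rw [hf]
        have hk' : k - 3 < L.length*3 := by simp at hk; omega
        rw [ih (k-3) hk']
        have e1 : k/3 = (k-3)/3 + 1 := by omega
        have e2 : k % 3 = (k-3) % 3 := by omega
        rw [e1, e2, List.getD_cons_succ]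

lemma pvGetD3 (s : List Int) (m : Nat) (hm : m < 3) : ([s, s, s]).getD m [] = s := by
  interval_cases m <;> rfl

lemma pvSRow_length (w : Nat) (row : List Int) : (pvSRow w row).length = w*3 := by
  rw [pvSRow, pvLen_flatMap3 _ _ (fun a => List.length_replicate)]
  simp

lemma pvSRow_getD (w : Nat) (row : List Int) (C : Nat) (hC : C < w*3) :
    (pvSRow w row).getD C 0 = row.getD (C/3) 0 := by
  rw [pvSRow, pvGetD_flatMap3 _ 0 _ (fun a => List.length_replicate) C (by simpa using hC)]
  rw [List.getD_replicate _ (by omega)]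
  congr 1
  have h1 : C/3 < w := by omega
  simp [List.getD_eq_getElem?_getD, h1]

lemma pvB_length (g : List (List Int)) (hg : ¬ (g = [] ∨ g.headD [] = [])) :
    (scale_up_3x_alt g).length = g.length*3 := by
  rw [pvB_eq_flatMap g hg, pvLen_flatMap3 _ _ (fun a => rfl)]

lemma pvB_getD_row (g : List (List Int)) (hg : ¬ (g = [] ∨ g.headD [] = []))
    (R : Nat) (hR : R < g.length*3) :
    (scale_up_3x_alt g).getD R [] = pvSRow (g.headD []).length (g.getD (R/3) []) := by
  rw [pvB_eq_flatMap g hg, pvGetD_flatMap3 _ [] _ (fun a => rfl) R hR]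
  exact pvGetD3 _ _ (Nat.mod_lt _ (by omega))

-- ===== VERDICT (by name: the statement is the Claim_ definition above) =====
theorem scale_up_3x_spec : Claim_equal_scale_up_3x := by
  intro g _ _
  unfold Spec_scale_up_3x
  by_cases hg : g = [] ∨ g.headD [] = []
  · simp only [scale_up_3x, scale_up_3x_alt, hg, if_pos]
  · apply List.ext_getElem
    · rw [pvA_length g hg, pvB_length g hg]
    · intro R hA hB
      rw [pvA_length g hg] at hA
      have hrowA : (scale_up_3x g)[R] = (scale_up_3x g).getD R [] :=
        (List.getD_eq_getElem _ _ _).symm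
      have hrowB : (scale_up_3x_alt g)[R] = (scale_up_3x_alt g).getD R [] :=
        (List.getD_eq_getElem _ _ _).symm
      rw [hrowA, hrowB]
      apply List.ext_getElem
      · rw [pvA_rowlen g hg R hA, pvB_getD_row g hg R hA, pvSRow_length]
      · intro C hCA hCB
        rw [pvA_rowlen g hg R hA] at hCA
        rw [← List.getD_eq_getElem _ (0:Int), ← List.getD_eq_getElem _ (0:Int)]
        rw [pvA_getD g hg R C hA hCA, pvB_getD_row g hg R hA, pvSRow_getD _ _ C hCA]
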